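-- pv_equiv track=rewrite | github.com/RazorBest/Crypto-Rampage | nsucrypto2023/second_round/problem_02/solve.py | three_gen_4
-- ===== SOURCE A (Python) =====
-- def three_gen_4(base=1, sq=3, limit=20):
--     x = base * sq
--     l = []
--     for _ in range(limit):
--         l.append(x)
--         sq *= sq
--         x *= sq
--
--     return l
-- ===== SOURCE B (Python) =====
-- def three_gen_4(base=1, sq=3, limit=20):
--     return [base * sq ** (2 ** (k + 1) - 1) for k in range(limit)]
-- ===== Notes on version B (the rewrite author's own statement) =====
-- stated objective: idiomatic
-- what changed: Replaces the stateful loop threading a running squared value and accumulated product with a single comprehension computing each element directly from its closed-form exponent 2^(k+1)-1.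
import Mathlib
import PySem

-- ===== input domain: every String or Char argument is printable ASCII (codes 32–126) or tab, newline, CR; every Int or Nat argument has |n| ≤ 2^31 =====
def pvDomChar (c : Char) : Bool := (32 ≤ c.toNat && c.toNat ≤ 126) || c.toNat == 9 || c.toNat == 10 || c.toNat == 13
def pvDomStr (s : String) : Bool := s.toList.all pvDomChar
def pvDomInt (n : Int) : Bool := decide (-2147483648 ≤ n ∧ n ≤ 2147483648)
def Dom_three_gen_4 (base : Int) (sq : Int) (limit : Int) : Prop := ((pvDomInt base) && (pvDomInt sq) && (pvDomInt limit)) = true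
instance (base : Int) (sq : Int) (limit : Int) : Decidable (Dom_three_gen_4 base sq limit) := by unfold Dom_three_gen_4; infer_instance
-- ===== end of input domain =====

-- B computes each element directly from its closed-form exponent 2^(k+1)-1 in one
-- comprehension instead of A's stateful loop (idiomatic; same cost).

-- ===== PORT A =====
-- literal transliteration of A's loop: state (x, sq, l), one step per range(limit) element
def three_gen_4 (base : Int) (sq : Int) (limit : Int) : List Int :=
  let x := base * sq
  let st := (PySem.List.pyRange 0 limit 1).foldl
    (fun (st : Int × Int × List Int) _ =>
      let l := st.2.2 ++ [st.1]
      let sq := st.2.1 * st.2.1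
      let x := st.1 * sq
      (x, sq, l)) (x, sq, [])
  st.2.2

-- ===== PORT B =====
-- literal transliteration of Source B's comprehension (k ≥ 0 in range, so the Nat exponent is exact)
def three_gen_4_alt (base : Int) (sq : Int) (limit : Int) : List Int :=
  (PySem.List.pyRange 0 limit 1).map (fun k => base * sq ^ (2 ^ (k.toNat + 1) - 1))

-- ===== PRECONDITION & SPEC =====
def Spec_three_gen_4 (base : Int) (sq : Int) (limit : Int) (out : List Int) : Prop := out = three_gen_4_alt base sq limit
instance (base : Int) (sq : Int) (limit : Int) (out : List Int) : Decidable (Spec_three_gen_4 base sq limit out) := by unfold Spec_three_gen_4; infer_instance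

-- ===== CLAIM (what is proved, stated in full; the proofs are below) =====
def Claim_equal_three_gen_4 : Prop := ∀ (base : Int) (sq : Int) (limit : Int), Dom_three_gen_4 base sq limit → Spec_three_gen_4 base sq limit (three_gen_4 base sq limit)

-- ===== LEMMAS AND PROOFS =====

-- A's loop body, with the ignored range element dropped
def pvStep (st : Int × Int × List Int) : Int × Int × List Int :=
  (st.1 * (st.2.1 * st.2.1), st.2.1 * st.2.1, st.2.2 ++ [st.1])

theorem foldl_const_step {α : Type} (L : List α) (st : Int × Int × List Int) :
    L.foldl (fun (st : Int × Int × List Int) _ =>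
      (st.1 * (st.2.1 * st.2.1), st.2.1 * st.2.1, st.2.2 ++ [st.1])) st = pvStep^[L.length] st := by
  induction L generalizing st with
  | nil => rfl
  | cons a t ih => simp [List.foldl_cons, ih, Function.iterate_succ_apply, pvStep]

theorem pvStep_iterate (n : Nat) (b s : Int) :
    pvStep^[n] (b * s, s, []) =
      (b * s ^ (2 ^ (n + 1) - 1), s ^ 2 ^ n,
        (List.range n).map (fun k => b * s ^ (2 ^ (k + 1) - 1))) := by
  induction n with
  | zero => simp [pow_one]
  | succ n ih =>
    rw [Function.iterate_succ_apply', ih]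
    simp only [pvStep, List.range_succ, List.map_append, List.map_cons, List.map_nil, Prod.mk.injEq]
    refine ⟨?_, ?_, trivial⟩
    · have e1 : 2 ^ (n + 1 + 1) - 1 = (2 ^ (n + 1) - 1) + (2 ^ n + 2 ^ n) := by
        have h1 : (1:Nat) ≤ 2 ^ (n + 1) := Nat.one_le_two_pow
        have h2 : 2 ^ (n + 1 + 1) = 2 ^ (n + 1) + 2 ^ (n + 1) := by ring
        have h3 : 2 ^ (n + 1) = 2 ^ n + 2 ^ n := by ring
        omega
      rw [e1]; ring
    · have e2 : 2 ^ (n + 1) = 2 ^ n + 2 ^ n := by ring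
      rw [e2, pow_add]

theorem three_gen_4_eq (base sq limit : Int) :
    three_gen_4 base sq limit = three_gen_4_alt base sq limit := by
  simp only [three_gen_4, three_gen_4_alt]
  rw [foldl_const_step, PySem.List.length_pyRange_one, pvStep_iterate,
      PySem.List.pyRange_one, List.map_map]
  apply List.map_congr_left
  intro k hk
  simp

-- ===== VERDICT (by name: the statement is the Claim_ definition above) =====
theorem three_gen_4_spec : Claim_equal_three_gen_4 := by
  intro base sq limit _
  exact three_gen_4_eq base sq limit
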